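-- pv_equiv track=rewrite | github.com/Rukkyaa/42_april_event | ex14/sastantua.py | get_first_line_spaces
-- ===== SOURCE A (Python) =====
-- def	get_first_line_spaces(height: int) -> int:
-- 	spaces = 2
-- 	increment = 6
-- 	for i in range(height - 1):
-- 		spaces += increment
-- 		if i % 2 == 0:
-- 			increment += 1
-- 		else:
-- 			increment += 2
-- 	return spaces
-- ===== SOURCE B (Python) =====
-- def get_first_line_spaces(height: int) -> int:
--     n = max(height - 1, 0)
--     return 2 + 6 * n + n * (n - 1) // 2 + (n - 1) * (n - 1) // 4
-- ===== Notes on version B (the rewrite author's own statement) =====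
-- stated objective: faster
-- what changed: Replaced the O(height) accumulating loop by a closed-form quadratic formula (sum of the arithmetic-ish increment sequence computed with two floor divisions).
import Mathlib
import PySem

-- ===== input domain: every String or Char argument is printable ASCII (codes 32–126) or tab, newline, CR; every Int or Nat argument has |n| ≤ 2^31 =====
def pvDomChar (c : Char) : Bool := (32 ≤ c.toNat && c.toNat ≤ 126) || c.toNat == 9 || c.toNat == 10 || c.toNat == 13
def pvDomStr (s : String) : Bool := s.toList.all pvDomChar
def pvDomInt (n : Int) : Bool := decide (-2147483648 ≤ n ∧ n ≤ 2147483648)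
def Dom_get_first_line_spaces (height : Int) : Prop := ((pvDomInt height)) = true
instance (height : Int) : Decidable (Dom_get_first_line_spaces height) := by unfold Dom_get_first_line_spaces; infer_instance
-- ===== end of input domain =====

-- B replaces A's accumulating loop by a closed-form quadratic formula (objective: faster).

-- ===== PORT A =====
def pvStepA (st : Int × Int) (i : Int) : Int × Int :=
  let spaces := st.1 + st.2
  if PySem.Int.mod i 2 == 0 then (spaces, st.2 + 1) else (spaces, st.2 + 2)

def get_first_line_spaces (height : Int) : Int :=
  ((PySem.List.pyRange 0 (height - 1) 1).foldl pvStepA (2, 6)).1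

-- ===== PORT B =====
def get_first_line_spaces_alt (height : Int) : Int :=
  let n := max (height - 1) 0
  2 + 6 * n + PySem.Int.floordiv (n * (n - 1)) 2 + PySem.Int.floordiv ((n - 1) * (n - 1)) 4

-- ===== PRECONDITION & SPEC =====
def Spec_get_first_line_spaces (height : Int) (out : Int) : Prop := out = get_first_line_spaces_alt height
instance (height : Int) (out : Int) : Decidable (Spec_get_first_line_spaces height out) := by unfold Spec_get_first_line_spaces; infer_instance

-- ===== CLAIM (what is proved, stated in full; the proofs are below) =====
def Claim_equal_get_first_line_spaces : Prop := ∀ (height : Int), Dom_get_first_line_spaces height → Spec_get_first_line_spaces height (get_first_line_spaces height)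

-- ===== LEMMAS AND PROOFS =====

/-- Loop invariant, split by the parity of the iteration count (no divisions needed). -/
lemma pvStepA_inv (t : Nat) :
    (PySem.List.pyRange 0 (2 * (t : Int)) 1).foldl pvStepA (2, 6)
        = (2 + 3 * (t : Int) * t + 10 * t, 6 + 3 * (t : Int)) ∧
    (PySem.List.pyRange 0 (2 * (t : Int) + 1) 1).foldl pvStepA (2, 6)
        = (8 + 3 * (t : Int) * t + 13 * t, 7 + 3 * (t : Int)) := by
  induction t with
  | zero =>
    constructor
    · norm_num [PySem.List.pyRange_one_eq_nil]
    · decide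
  | succ t ih =>
    have heven : PySem.List.pyRange 0 (2 * ((t : Int) + 1)) 1
        = PySem.List.pyRange 0 (2 * (t : Int) + 1) 1 ++ [2 * (t : Int) + 1] := by
      have : 2 * ((t : Int) + 1) = (2 * (t : Int) + 1) + 1 := by ring
      rw [this]
      exact PySem.List.pyRange_one_succ_right (by omega)
    have hmods : PySem.Int.mod (2 * (t : Int) + 1) 2 = 1 := by
      rw [PySem.Int.mod_eq_emod_of_pos (by norm_num)]; omega
    have h1 : (PySem.List.pyRange 0 (2 * ((t : Int) + 1)) 1).foldl pvStepA (2, 6)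
        = (2 + 3 * ((t : Int) + 1) * (t + 1) + 10 * (t + 1), 6 + 3 * ((t : Int) + 1)) := by
      rw [heven, List.foldl_append, ih.2]
      simp only [List.foldl, pvStepA, hmods]
      norm_num
      exact ⟨by ring, by ring⟩
    constructor
    · push_cast
      exact h1
    · have hodd : PySem.List.pyRange 0 (2 * ((t : Int) + 1) + 1) 1
          = PySem.List.pyRange 0 (2 * ((t : Int) + 1)) 1 ++ [2 * ((t : Int) + 1)] :=
        PySem.List.pyRange_one_succ_right (by omega)
      have hmode : PySem.Int.mod (2 * ((t : Int) + 1)) 2 = 0 := by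
        rw [PySem.Int.mod_eq_emod_of_pos (by norm_num)]; omega
      push_cast
      rw [hodd, List.foldl_append, h1]
      simp only [List.foldl, pvStepA, hmode]
      norm_num
      exact ⟨by ring, by ring⟩

-- ===== VERDICT (by name: the statement is the Claim_ definition above) =====
theorem get_first_line_spaces_spec : Claim_equal_get_first_line_spaces := by
  intro height _
  unfold Spec_get_first_line_spaces get_first_line_spaces get_first_line_spaces_alt
  by_cases hle : height - 1 ≤ 0
  · rw [PySem.List.pyRange_one_eq_nil hle]
    have hmax : max (height - 1) 0 = 0 := by omega
    simp only [hmax]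
    decide
  · have hmax : max (height - 1) 0 = height - 1 := by omega
    simp only [hmax]
    obtain ⟨k, hk⟩ : ∃ k : Nat, height - 1 = (k : Int) := ⟨(height - 1).toNat, by omega⟩
    rw [hk]
    rw [PySem.Int.floordiv_eq_ediv_of_pos (b := 2) (by norm_num),
        PySem.Int.floordiv_eq_ediv_of_pos (b := 4) (by norm_num)]
    rcases Nat.even_or_odd k with ⟨t, ht⟩ | ⟨t, ht⟩
    · have hk2 : (k : Int) = 2 * (t : Int) := by push_cast [ht]; ring
      rw [hk2, (pvStepA_inv t).1]
      have e1 : 2 * (t : Int) * (2 * t - 1) = (2 * (t : Int) * t - t) * 2 := by ring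
      have e2 : (2 * (t : Int) - 1) * (2 * (t : Int) - 1)
          = 1 + ((t : Int) * t - t) * 4 := by ring
      rw [e1, e2, Int.mul_ediv_cancel _ (by norm_num : (2:Int) ≠ 0),
          Int.add_mul_ediv_right _ _ (by norm_num : (4:Int) ≠ 0)]
      norm_num
      ring
    · have hk2 : (k : Int) = 2 * (t : Int) + 1 := by push_cast [ht]; ring
      rw [hk2, (pvStepA_inv t).2]
      have e1 : (2 * (t : Int) + 1) * (2 * t + 1 - 1) = (2 * (t : Int) * t + t) * 2 := by ring
      have e2 : (2 * (t : Int) + 1 - 1) * (2 * (t : Int) + 1 - 1)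
          = ((t : Int) * t) * 4 := by ring
      rw [e1, e2, Int.mul_ediv_cancel _ (by norm_num : (2:Int) ≠ 0),
          Int.mul_ediv_cancel _ (by norm_num : (4:Int) ≠ 0)]
      ring
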